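-- pv_equiv track=rewrite | github.com/zuriyaAnsbacher/MHC_Peptide_Binding | Autoencoder/AE_with_CNN.py | create_dict_aa_position
-- ===== SOURCE A (Python) =====
-- def create_dict_aa_position(amino_acids, max_len):
--     amino_pos_to_num = dict()
--     count = 1
--     for amino in amino_acids:
--         for pos in range(max_len):
--             pair = (amino, pos)
--             amino_pos_to_num[pair] = count
--             count += 1
--     # amino = 'X'
--     # for pos in range(max_len):
--     #     pair = (amino, pos)
--     #     amino_pos_to_num[pair] = count
--
--     return amino_pos_to_num
-- ===== SOURCE B (Python) =====
-- def create_dict_aa_position(amino_acids, max_len):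
--     # One flat pass over a single product index k; the entry for k is
--     # recovered by divmod instead of nested loops with a running counter.
--     return {(amino_acids[k // max_len], k % max_len): k + 1
--             for k in range(len(amino_acids) * max_len)}
-- ===== Notes on version B (the rewrite author's own statement) =====
-- stated objective: alternative
-- what changed: Replaces A's nested loops with a mutable running counter by a single flat pass over the product index k in range(len(amino_acids)*max_len), recovering each key as (amino_acids[k // max_len], k % max_len) by divmod and each value as k+1.
import Mathlib
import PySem

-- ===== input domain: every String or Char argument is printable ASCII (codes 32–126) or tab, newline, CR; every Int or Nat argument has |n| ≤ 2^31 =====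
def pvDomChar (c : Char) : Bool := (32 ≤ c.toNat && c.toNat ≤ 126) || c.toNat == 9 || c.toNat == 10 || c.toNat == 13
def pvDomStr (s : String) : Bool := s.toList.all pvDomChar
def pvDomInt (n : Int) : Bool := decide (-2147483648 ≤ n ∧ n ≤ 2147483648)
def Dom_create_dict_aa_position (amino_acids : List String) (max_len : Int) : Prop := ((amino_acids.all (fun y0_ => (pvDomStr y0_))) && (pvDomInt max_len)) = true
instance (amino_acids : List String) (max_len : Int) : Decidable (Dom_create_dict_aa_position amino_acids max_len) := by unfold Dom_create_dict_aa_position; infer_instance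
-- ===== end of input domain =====

-- B replaces A's nested loops with a mutable counter by ONE flat pass over the product index k,
-- recovering (amino, pos) = (amino_acids[k // max_len], k % max_len) by divmod; same cost, different decomposition.

-- ===== PORT A =====
-- nested for-loops threading the state (dict, count)
def create_dict_aa_position (amino_acids : List String) (max_len : Int) : List (String × Int × Int) :=
  (amino_acids.foldl
    (fun (s : PySem.Dict (String × Int) Int × Int) amino =>
      (PySem.List.pyRange 0 max_len 1).foldl
        (fun (s : PySem.Dict (String × Int) Int × Int) pos =>
          (s.1.insert (amino, pos) s.2, s.2 + 1)) s)
    (PySem.Dict.empty, 1)).1.items.map (fun kv => (kv.1.1, kv.1.2, kv.2))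

-- ===== PORT B =====
-- one flat loop over range(len(amino_acids) * max_len); the index k // max_len is always in range
-- when the loop body runs, so pyGetD with a junk default is exact (the IndexError branch is unreachable)
def create_dict_aa_position_alt (amino_acids : List String) (max_len : Int) : List (String × Int × Int) :=
  ((PySem.List.pyRange 0 ((amino_acids.length : Int) * max_len) 1).foldl
    (fun (d : PySem.Dict (String × Int) Int) k =>
      d.insert (PySem.List.pyGetD amino_acids (PySem.Int.floordiv k max_len) "", PySem.Int.mod k max_len) (k + 1))
    PySem.Dict.empty).items.map (fun kv => (kv.1.1, kv.1.2, kv.2))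

-- ===== PRECONDITION & SPEC =====
def Spec_create_dict_aa_position (amino_acids : List String) (max_len : Int) (out : List (String × Int × Int)) : Prop := out = create_dict_aa_position_alt amino_acids max_len
instance (amino_acids : List String) (max_len : Int) (out : List (String × Int × Int)) : Decidable (Spec_create_dict_aa_position amino_acids max_len out) := by unfold Spec_create_dict_aa_position; infer_instance

-- ===== CLAIM (what is proved, stated in full; the proofs are below) =====
def Claim_equal_create_dict_aa_position : Prop := ∀ (amino_acids : List String) (max_len : Int), Dom_create_dict_aa_position amino_acids max_len → Spec_create_dict_aa_position amino_acids max_len (create_dict_aa_position amino_acids max_len)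

-- ===== LEMMAS AND PROOFS =====

-- common intermediate form: fold over enumerate with closed-form values i*m+pos+1
def enumForm (l : List String) (i : Int) (m : Int) (d : PySem.Dict (String × Int) Int) : PySem.Dict (String × Int) Int :=
  (PySem.List.enumerate l i).foldl
    (fun (d : PySem.Dict (String × Int) Int) ia =>
      (PySem.List.pyRange 0 m 1).foldl
        (fun d pos => d.insert (ia.2, pos) (ia.1 * m + pos + 1)) d) d

-- A's inner loop: the counter advances by the range length and each value is base-plus-position
lemma innerA (a : String) (n : Nat) (d : PySem.Dict (String × Int) Int) (c : Int) :
    (PySem.List.pyRange 0 (n : Int) 1).foldl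
      (fun (s : PySem.Dict (String × Int) Int × Int) pos => (s.1.insert (a, pos) s.2, s.2 + 1)) (d, c)
    = ((PySem.List.pyRange 0 (n : Int) 1).foldl (fun d p => d.insert (a, p) (c + p)) d, c + n) := by
  induction n generalizing d c with
  | zero =>
      rw [PySem.List.pyRange_one_eq_nil (by omega)]
      simp
  | succ m ih =>
      have hsplit : PySem.List.pyRange 0 ((m + 1 : Nat) : Int) 1
          = PySem.List.pyRange 0 (m : Int) 1 ++ [(m : Int)] := by
        have : ((m + 1 : Nat) : Int) = (m : Int) + 1 := by push_cast; ring
        rw [this, PySem.List.pyRange_one_succ_right (by positivity)]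
      rw [hsplit, List.foldl_append, List.foldl_append, ih]
      simp only [List.foldl_cons, List.foldl_nil, Prod.mk.injEq]
      refine ⟨trivial, by push_cast; ring⟩

-- A's nested fold equals the enumerate form
lemma outerA (n : Nat) (l : List String) (d : PySem.Dict (String × Int) Int) (i : Int) :
    (l.foldl
      (fun (s : PySem.Dict (String × Int) Int × Int) amino =>
        (PySem.List.pyRange 0 (n : Int) 1).foldl
          (fun (s : PySem.Dict (String × Int) Int × Int) pos =>
            (s.1.insert (amino, pos) s.2, s.2 + 1)) s)
      (d, i * (n : Int) + 1)).1
    = enumForm l i (n : Int) d := by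
  induction l generalizing d i with
  | nil => simp [enumForm]
  | cons a t ih =>
      rw [List.foldl_cons, innerA]
      have h2 : i * (n : Int) + 1 + (n : Int) = (i + 1) * (n : Int) + 1 := by ring
      rw [h2, ih]
      unfold enumForm
      rw [PySem.List.enumerate_cons, List.foldl_cons]
      congr 1
      apply PySem.List.foldl_congr_mem
      intro acc p _
      congr 1
      ring

-- B's flat segment over [j*m, (j + |l|)*m) equals the enumerate form of l = L.drop j
lemma flatB (m : Nat) (hm : 0 < (m : Int)) (L : List String) (j : Nat) (hj : j ≤ L.length)
    (d : PySem.Dict (String × Int) Int) :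
    (PySem.List.pyRange ((j : Int) * m) ((L.length : Int) * m) 1).foldl
      (fun (d : PySem.Dict (String × Int) Int) k =>
        d.insert (PySem.List.pyGetD L (PySem.Int.floordiv k (m : Int)) "", PySem.Int.mod k (m : Int)) (k + 1)) d
    = enumForm (L.drop j) (j : Int) (m : Int) d := by
  generalize hfuel : L.length - j = fuel
  induction fuel generalizing j d with
  | zero =>
      have hj' : j = L.length := by omega
      subst hj'
      rw [PySem.List.pyRange_one_eq_nil (by omega)]
      simp [enumForm]
  | succ f ih =>
      have hjlt : j < L.length := by omega
      have hsplit := PySem.List.pyRange_one_append ((j : Int) * m) (((j : Int) + 1) * m)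
        ((L.length : Int) * m)
        (by nlinarith) (by nlinarith [Int.ofNat_lt.mpr hjlt])
      rw [hsplit, List.foldl_append]
      -- first segment: indices k = j*m + p, 0 ≤ p < m
      have hseg : PySem.List.pyRange ((j : Int) * m) (((j : Int) + 1) * m) 1
          = (PySem.List.pyRange 0 (m : Int) 1).map (fun p => (j : Int) * m + p) := by
        rw [PySem.List.pyRange_one, PySem.List.pyRange_one]
        have h1 : (((j : Int) + 1) * m - (j : Int) * m) = (m : Int) := by ring
        have h2 : ((m : Int) - 0) = (m : Int) := by ring
        rw [h1, h2, List.map_map]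
        simp
      have hdrop : L.drop j = L[j] :: L.drop (j + 1) := List.drop_eq_getElem_cons hjlt
      rw [hseg, List.foldl_map, hdrop]
      unfold enumForm
      rw [PySem.List.enumerate_cons, List.foldl_cons]
      have hfirst : ∀ (acc : PySem.Dict (String × Int) Int) (p : Int), p ∈ PySem.List.pyRange 0 (m : Int) 1 →
          acc.insert (PySem.List.pyGetD L (PySem.Int.floordiv ((j : Int) * m + p) (m : Int)) "",
              PySem.Int.mod ((j : Int) * m + p) (m : Int)) ((j : Int) * m + p + 1)
          = acc.insert (L[j], p) ((j : Int) * m + p + 1) := by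
        intro acc p hp
        rw [PySem.List.mem_pyRange_one] at hp
        have hfd : PySem.Int.floordiv ((j : Int) * m + p) (m : Int) = (j : Int) := by
          rw [PySem.Int.floordiv_eq_iff_of_pos hm]
          constructor <;> nlinarith
        have hmod : PySem.Int.mod ((j : Int) * m + p) (m : Int) = p := by
          have := PySem.Int.floordiv_mul_add_mod ((j : Int) * m + p) (m : Int)
          rw [hfd] at this
          omega
        rw [hfd, hmod]
        congr 2
        rw [PySem.List.pyGetD_natCast]
        simp [hjlt]
      rw [PySem.List.foldl_congr_mem _ _
        (fun (acc : PySem.Dict (String × Int) Int) p => acc.insert (L[j], p) ((j : Int) * m + p + 1)) d hfirst]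
      have hrec := ih (j + 1) (by omega)
        ((PySem.List.pyRange 0 (m : Int) 1).foldl (fun acc p => acc.insert (L[j], p) ((j : Int) * m + p + 1)) d)
        (by omega)
      have hcast : ((j + 1 : Nat) : Int) * m = ((j : Int) + 1) * m := by push_cast; ring
      rw [hcast] at hrec
      rw [hrec]
      unfold enumForm
      push_cast
      rfl

-- ===== VERDICT (by name: the statement is the Claim_ definition above) =====
theorem create_dict_aa_position_spec : Claim_equal_create_dict_aa_position := by
  intro amino_acids max_len _
  unfold Spec_create_dict_aa_position create_dict_aa_position create_dict_aa_position_alt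
  by_cases hm : 0 < max_len
  · obtain ⟨n, rfl⟩ : ∃ n : Nat, (n : Int) = max_len := ⟨max_len.toNat, Int.toNat_of_nonneg (by omega)⟩
    have hA := outerA n amino_acids PySem.Dict.empty 0
    simp only [zero_mul, zero_add] at hA
    have hB := flatB n hm amino_acids 0 (by omega) PySem.Dict.empty
    simp only [Nat.cast_zero, zero_mul, List.drop_zero] at hB
    rw [hA, hB]
  · have hr : PySem.List.pyRange 0 max_len 1 = [] :=
      PySem.List.pyRange_one_eq_nil (by omega)
    have hr2 : PySem.List.pyRange 0 ((amino_acids.length : Int) * max_len) 1 = [] :=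
      PySem.List.pyRange_one_eq_nil (by nlinarith [Int.natCast_nonneg amino_acids.length])
    simp [hr, hr2]
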